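-- pv_equiv track=rewrite | github.com/gmanhas12/Math402W-model | main.py | _month_labels
-- ===== SOURCE A (Python) =====
-- SIM_START_MONTH     = 4           # April (month 1 of sim = April 2026)
--
-- def _month_labels(months: int, start_month: int = SIM_START_MONTH) -> list[str]:
--     """Generate 'Apr 26', 'May 26' … labels for the x-axis."""
--     month_names = ["Jan","Feb","Mar","Apr","May","Jun",
--                    "Jul","Aug","Sep","Oct","Nov","Dec"]
--     labels = []
--     for i in range(months):
--         cal = ((start_month - 1 + i) % 12)
--         yr  = 26 + ((start_month - 1 + i) // 12)
--         labels.append(f"{month_names[cal]} '{yr}")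
--     return labels
-- ===== SOURCE B (Python) =====
-- SIM_START_MONTH = 4
--
--
-- def _month_labels(months: int, start_month: int = SIM_START_MONTH) -> list[str]:
--     """Generate 'Apr 26', 'May 26' ... labels for the x-axis."""
--     month_names = ["Jan","Feb","Mar","Apr","May","Jun",
--                    "Jul","Aug","Sep","Oct","Nov","Dec"]
--     if months <= 0:
--         return []
--     cal = (start_month - 1) % 12
--     yr = 26 + (start_month - 1) // 12
--     # Stage 1: build whole-year blocks (a partial first year, then full years)
--     # until at least `months` labels exist; Stage 2: flatten and cut to length.
--     blocks = [[f"{m} '{yr}" for m in month_names[cal:]]]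
--     produced = 12 - cal
--     while produced < months:
--         yr += 1
--         blocks.append([f"{m} '{yr}" for m in month_names])
--         produced += 12
--     return [lab for block in blocks for lab in block][:months]
-- ===== Notes on version B (the rewrite author's own statement) =====
-- stated objective: alternative
-- what changed: Instead of computing month and year with %/// for every loop index, B builds calendar-year blocks of labels (one partial first year, then whole 12-month years) until enough labels exist, then flattens the blocks and slices the list to the requested length.
import Mathlib
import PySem

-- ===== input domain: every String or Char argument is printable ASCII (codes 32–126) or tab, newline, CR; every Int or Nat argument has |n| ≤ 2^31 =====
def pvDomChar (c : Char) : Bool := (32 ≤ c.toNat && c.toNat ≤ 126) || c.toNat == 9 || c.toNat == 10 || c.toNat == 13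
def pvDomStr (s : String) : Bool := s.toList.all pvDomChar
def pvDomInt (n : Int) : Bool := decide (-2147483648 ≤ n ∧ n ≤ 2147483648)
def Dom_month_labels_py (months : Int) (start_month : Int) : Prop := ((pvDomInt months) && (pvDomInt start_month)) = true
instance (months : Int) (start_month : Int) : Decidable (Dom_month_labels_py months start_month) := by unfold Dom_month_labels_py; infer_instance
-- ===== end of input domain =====

-- B builds calendar-year blocks of labels (a partial first year, then whole 12-month
-- years) until enough labels exist, then flattens the blocks and cuts to length,
-- instead of A's per-index loop recomputing % and // for every label.

def pvMonthNames : List String :=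
  ["Jan","Feb","Mar","Apr","May","Jun","Jul","Aug","Sep","Oct","Nov","Dec"]

-- ===== PORT A =====
def month_labels_py (months : Int) (start_month : Int) : List String :=
  (PySem.List.pyRange 0 months 1).foldl (fun labels i =>
    let cal := PySem.Int.mod (start_month - 1 + i) 12
    let yr  := 26 + PySem.Int.floordiv (start_month - 1 + i) 12
    labels ++ [PySem.List.pyGetD pvMonthNames cal "" ++ " '" ++ PySem.Int.toStr yr]) []

-- ===== PORT B =====
-- the comprehension [f"{m} '{yr}" for m in names]
def pvYearBlock (names : List String) (yr : Int) : List String :=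
  names.map (fun m => m ++ " '" ++ PySem.Int.toStr yr)

-- the while loop: `need` = months - produced (0 once produced ≥ months; Nat since
-- both are bounded ints with produced ≤ months there); each pass appends one
-- full-year block with the incremented year.
def pvGrow (need : Nat) (yr : Int) : List (List String) :=
  if _h : need = 0 then []
  else pvYearBlock pvMonthNames (yr + 1) :: pvGrow (need - 12) (yr + 1)
termination_by need
decreasing_by omega

def month_labels_py_alt (months : Int) (start_month : Int) : List String :=
  if months ≤ 0 then []
  else
    -- cal / yr computed once; [:months] is a plain prefix here (months > 0)
    (pvYearBlock (pvMonthNames.drop (PySem.Int.mod (start_month - 1) 12).toNat)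
        (26 + PySem.Int.floordiv (start_month - 1) 12) ::
      pvGrow (months.toNat - (12 - (PySem.Int.mod (start_month - 1) 12).toNat))
        (26 + PySem.Int.floordiv (start_month - 1) 12)).flatten.take months.toNat

-- ===== PRECONDITION & SPEC =====
def Spec_month_labels_py (months : Int) (start_month : Int) (out : List String) : Prop := out = month_labels_py_alt months start_month
instance (months : Int) (start_month : Int) (out : List String) : Decidable (Spec_month_labels_py months start_month out) := by unfold Spec_month_labels_py; infer_instance

-- ===== CLAIM (what is proved, stated in full; the proofs are below) =====
def Claim_equal_month_labels_py : Prop := ∀ (months : Int) (start_month : Int), Dom_month_labels_py months start_month → Spec_month_labels_py months start_month (month_labels_py months start_month)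

-- ===== LEMMAS AND PROOFS =====

-- the label at absolute month offset k (ediv/emod world)
def pvLbl (k : Int) : String :=
  PySem.List.pyGetD pvMonthNames (k % 12) "" ++ " '" ++ PySem.Int.toStr (26 + k / 12)

theorem pv_foldl_append {α β : Type} (f : α → β) :
    ∀ (l : List α) (init : List β),
      l.foldl (fun acc i => acc ++ [f i]) init = init ++ l.map f := by
  intro l
  induction l with
  | nil => simp
  | cons a t ih => intro init; simp [List.foldl, ih]

theorem month_labels_py_eq (months start_month : Int) :
    month_labels_py months start_month
      = (List.range months.toNat).map (fun (i : Nat) => pvLbl (start_month - 1 + (i : Int))) := by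
  unfold month_labels_py
  rw [PySem.List.pyRange_one, pv_foldl_append]
  simp only [List.nil_append, List.map_map, Int.sub_zero]
  apply List.map_congr_left
  intro i _
  simp only [Function.comp]
  rw [PySem.Int.mod_eq_emod_of_pos (by omega),
      PySem.Int.floordiv_eq_ediv_of_pos (by omega)]
  simp [pvLbl]

theorem pv_range_add_map {β : Type} (a b : Nat) (f : Nat → β) :
    (List.range (a + b)).map f
      = (List.range a).map f ++ (List.range b).map (fun i => f (a + i)) := by
  rw [List.range_add, List.map_append, List.map_map]
  rfl

-- a (partial) year block, written as labels at consecutive absolute offsets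
theorem pv_block_eq (c : Nat) (hc : c ≤ 12) (q : Int) :
    pvYearBlock (pvMonthNames.drop c) (26 + q)
      = (List.range (12 - c)).map (fun (i : Nat) => pvLbl (12 * q + c + (i : Int))) := by
  have hlen : pvMonthNames.length = 12 := by decide
  apply List.ext_getElem
  · simp [pvYearBlock, hlen]
  · intro i h1 h2
    have hi : i < 12 - c := by simpa [pvYearBlock, hlen] using h1
    simp only [pvYearBlock, List.getElem_map, List.getElem_range, pvLbl]
    have hmod : (12 * q + (c : Int) + (i : Int)) % 12 = ((c + i : Nat) : Int) := by
      push_cast; omega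
    have hdiv : (12 * q + (c : Int) + (i : Int)) / 12 = q := by omega
    rw [hmod, hdiv, PySem.List.pyGetD_natCast]
    have hci : c + i < pvMonthNames.length := by omega
    rw [List.getD_eq_getElem _ _ hci, List.getElem_drop]

theorem pv_grow_take (need : Nat) : ∀ (yr : Int) (m : Nat), m ≤ need →
    ((pvGrow need yr).flatten).take m
      = (List.range m).map (fun (i : Nat) => pvLbl (12 * (yr + 1 - 26) + (i : Int))) := by
  induction need using Nat.strong_induction_on with
  | _ need ih =>
    intro yr m hm
    by_cases h0 : need = 0
    · subst h0
      have : m = 0 := by omega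
      subst this
      simp [pvGrow]
    · rw [pvGrow, dif_neg h0]
      have hblk : pvYearBlock pvMonthNames (yr + 1)
          = (List.range 12).map (fun (i : Nat) => pvLbl (12 * (yr + 1 - 26) + (i : Int))) := by
        have := pv_block_eq 0 (by omega) (yr + 1 - 26)
        simpa using this
      have hlen : (pvYearBlock pvMonthNames (yr + 1)).length = 12 := by
        simp [pvYearBlock, pvMonthNames]
      rw [List.flatten_cons, List.take_append, hlen, hblk, ← List.map_take, List.take_range]
      by_cases hm12 : m ≤ 12
      · have h1 : m - 12 = 0 := by omega
        have h2 : min m 12 = m := by omega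
        rw [h1, h2]
        simp
      · have h2 : min m 12 = 12 := by omega
        rw [h2, ih (need - 12) (by omega) (yr + 1) (m - 12) (by omega)]
        conv_rhs => rw [show m = 12 + (m - 12) by omega, pv_range_add_map]
        congr 1
        apply List.map_congr_left
        intro i _
        congr 1
        push_cast
        omega

theorem month_labels_py_alt_eq (months start_month : Int) :
    month_labels_py_alt months start_month
      = (List.range months.toNat).map (fun (i : Nat) => pvLbl (start_month - 1 + (i : Int))) := by
  unfold month_labels_py_alt
  by_cases hneg : months ≤ 0
  · rw [if_pos hneg]
    have : months.toNat = 0 := by omega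
    simp [this]
  · rw [if_neg hneg]
    rw [PySem.Int.mod_eq_emod_of_pos (by omega),
        PySem.Int.floordiv_eq_ediv_of_pos (by omega)]
    set k : Int := start_month - 1 with hk
    have hc0 : (0:Int) ≤ k % 12 := by omega
    have hc12 : k % 12 < 12 := by omega
    set c : Nat := (k % 12).toNat with hcdef
    have hcast : (c : Int) = k % 12 := by omega
    have hc : c ≤ 12 := by omega
    have hfirst : pvYearBlock (pvMonthNames.drop c) (26 + k / 12)
        = (List.range (12 - c)).map (fun (i : Nat) => pvLbl (k + (i : Int))) := by
      rw [pv_block_eq c hc (k / 12)]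
      apply List.map_congr_left
      intro i _
      congr 1
      omega
    have hlen : (pvYearBlock (pvMonthNames.drop c) (26 + k / 12)).length = 12 - c := by
      simp [pvYearBlock, pvMonthNames]
    set M : Nat := months.toNat with hM
    by_cases hsmall : M ≤ 12 - c
    · have hneed : M - (12 - c) = 0 := by omega
      rw [hneed, show pvGrow 0 (26 + k / 12) = [] from by rw [pvGrow]; simp]
      simp only [List.flatten_cons, List.flatten_nil, List.append_nil]
      rw [hfirst, ← List.map_take, List.take_range]
      have hmin : min M (12 - c) = M := by omega
      rw [hmin]
    · rw [List.flatten_cons, List.take_append, hlen, hfirst, ← List.map_take, List.take_range]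
      have hmin : min M (12 - c) = 12 - c := by omega
      rw [hmin, pv_grow_take (M - (12 - c)) (26 + k / 12) (M - (12 - c)) (le_refl _)]
      conv_rhs => rw [show M = (12 - c) + (M - (12 - c)) by omega, pv_range_add_map]
      congr 1
      apply List.map_congr_left
      intro i _
      congr 1
      push_cast
      omega

-- ===== VERDICT (by name: the statement is the Claim_ definition above) =====
theorem month_labels_py_spec : Claim_equal_month_labels_py := by
  intro months start_month _
  unfold Spec_month_labels_py
  rw [month_labels_py_eq, month_labels_py_alt_eq]
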